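-- pv_equiv track=rewrite | github.com/rostro36/AlphaLink2 | unifold/colab/data.py | _parse_msas
-- ===== SOURCE A (Python) =====
-- from typing import Dict, List, Sequence, Tuple, Union, Any, Optional
--
-- def _parse_msas(
--     descriptions: List[str],
--     sequences: List[str],
--     lengths: List[int],
--     counts: List[int]
-- ) -> Tuple[List[str], List[List[str]]]:
--     """
--     Parse multiple sequence alignments from descriptions and sequences.
--
--     Returns:
--         Tuple of (first_sequences, msas) where:
--             first_sequences: List of sequences from the first MSA line
--             msas: List of MSA groups, each containing formatted sequences
--     """
--     msas_dict: Dict[str, List[str]] = {}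
--     first_sequences: List[str] = []
--     is_first_iteration = True
--
--     for desc, seq in zip(descriptions, sequences):
--         accumulated_length = 0
--
--         for cluster_idx, (segment_length, segment_count) in enumerate(zip(lengths, counts)):
--             # Extract sequence segment
--             segment_start = accumulated_length
--             segment_end = segment_start + segment_length
--             segment_seq = seq[segment_start:segment_end]
--
--             # Store first sequences
--             if is_first_iteration:
--                 first_sequences.extend([segment_seq] * segment_count)
--
--             # Create description for this segment
--             segment_desc = f"{desc}_{cluster_idx}"
--
--             # Skip empty segments
--             if segment_seq != "-" * len(segment_seq):
--                 # Add to each count in the segment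
--                 for count_idx in range(segment_count):
--                     dict_key = f"{cluster_idx}_{count_idx}"
--
--                     if dict_key not in msas_dict:
--                         msas_dict[dict_key] = []
--
--                     # Format: "description\nsequence\n"
--                     formatted_entry = f"{segment_desc}\n{segment_seq}\n"
--                     msas_dict[dict_key].append(formatted_entry)
--
--             accumulated_length += segment_length
--
--         # Only first description-sequence pair contributes to first_sequences
--         is_first_iteration = False
--
--     # Convert dictionary to list of MSA groups
--     msas = list(msas_dict.values())
--
--     return first_sequences, msas
-- ===== SOURCE B (Python) =====
-- from itertools import accumulate
-- from typing import Dict, List, Tuple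
--
--
-- def _parse_msas(
--     descriptions: List[str],
--     sequences: List[str],
--     lengths: List[int],
--     counts: List[int]
-- ) -> Tuple[List[str], List[List[str]]]:
--     # Segment boundaries once, via prefix sums; one (start, end, count) span per cluster.
--     n = min(len(lengths), len(counts))
--     bounds = list(accumulate(lengths[:n], initial=0))
--     spans = list(zip(bounds, bounds[1:], counts))
--
--     rows = list(zip(descriptions, sequences))
--
--     first_sequences: List[str] = []
--     if rows:
--         seq0 = rows[0][1]
--         for a, b, cnt in spans:
--             first_sequences.extend([seq0[a:b]] * cnt)
--
--     # One entry list per cluster (not per (cluster, copy) pair): every copy gets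
--     # the identical list, so build it once and replicate at the end.
--     groups: Dict[int, List[str]] = {}
--     for desc, seq in rows:
--         for c, (a, b, _) in enumerate(spans):
--             seg = seq[a:b]
--             if seg != "-" * len(seg):
--                 groups.setdefault(c, []).append(f"{desc}_{c}\n{seg}\n")
--
--     msas: List[List[str]] = []
--     for c, entries in groups.items():
--         msas.extend([entries] * counts[c])
--     return first_sequences, msas
-- ===== Notes on version B (the rewrite author's own statement) =====
-- stated objective: faster
-- what changed: B precomputes (start, end, count) spans once with prefix sums, builds one entry list per cluster in a plain dict (instead of A's string-keyed dict with one identical list per (cluster, copy) pair, re-appending each entry count times per row), and replicates each cluster's list counts[c] times only at the end; first_sequences is built in its own separate pass over row 0.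
import Mathlib
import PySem

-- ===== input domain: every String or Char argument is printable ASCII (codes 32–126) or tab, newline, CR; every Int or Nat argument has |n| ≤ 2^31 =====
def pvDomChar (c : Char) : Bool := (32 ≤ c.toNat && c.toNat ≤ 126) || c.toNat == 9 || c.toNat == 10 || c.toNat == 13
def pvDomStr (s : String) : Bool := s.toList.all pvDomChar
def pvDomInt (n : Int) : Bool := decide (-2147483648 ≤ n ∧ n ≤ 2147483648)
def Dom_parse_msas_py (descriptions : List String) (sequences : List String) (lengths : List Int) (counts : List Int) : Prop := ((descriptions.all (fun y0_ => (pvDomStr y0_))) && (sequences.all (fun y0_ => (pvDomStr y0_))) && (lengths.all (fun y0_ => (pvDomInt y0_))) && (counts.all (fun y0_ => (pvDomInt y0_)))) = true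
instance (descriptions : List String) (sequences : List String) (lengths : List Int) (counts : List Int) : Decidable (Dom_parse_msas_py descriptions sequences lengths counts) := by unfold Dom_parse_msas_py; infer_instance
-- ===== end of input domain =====

-- B groups the formatted entries once per cluster (every "c_k" key of A holds the identical
-- list) and replicates each cluster's list counts[c] times at the end, instead of A's
-- per-(cluster, copy) string-keyed dict; same return value on every input.

-- shared textual helpers: exact ports of the f-strings f"{desc}_{c}", f"{sdesc}\n{seg}\n",
-- f"{c}_{k}" and of "-" * len(seg) (both Pythons compute these same strings)
def pvFmtDesc (desc : String) (c : Int) : String :=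
  String.ofList (desc.toList ++ '_' :: PySem.Int.toChars c)

def pvFmtEntry (sdesc seg : String) : String :=
  String.ofList (sdesc.toList ++ '\n' :: (seg.toList ++ ['\n']))

def pvKey (c k : Int) : String :=
  String.ofList (PySem.Int.toChars c ++ '_' :: PySem.Int.toChars k)

def pvDashes (seg : String) : String :=
  String.ofList (List.replicate (PySem.Str.len seg).toNat '-')

-- ===== PORT A =====
def parse_msas_py (descriptions : List String) (sequences : List String) (lengths : List Int) (counts : List Int) : List String × List (List String) :=
  let init : PySem.Dict String (List String) × List String × Bool := (PySem.Dict.empty, [], true)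
  let st := (descriptions.zip sequences).foldl (fun st p =>
    let inner := (PySem.List.enumerate (lengths.zip counts) 0).foldl
      (fun (s : Int × PySem.Dict String (List String) × List String) e =>
        let segStart := s.1
        let segEnd := segStart + e.2.1
        let seg := PySem.Str.slice p.2 (some segStart) (some segEnd)
        let fs := if st.2.2 then s.2.2 ++ PySem.List.pyRepeat [seg] e.2.2 else s.2.2
        let sdesc := pvFmtDesc p.1 e.1
        let d :=
          if seg ≠ pvDashes seg then
            (PySem.List.pyRange 0 e.2.2 1).foldl (fun d k =>
              let key := pvKey e.1 k
              let d' := if d.contains key then d else d.insert key []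
              d'.insert key (d'.getD key [] ++ [pvFmtEntry sdesc seg])) s.2.1
          else s.2.1
        (s.1 + e.2.1, d, fs))
      (0, st.1, st.2.1)
    (inner.2.1, inner.2.2, false)) init
  (st.2.1, st.1.values)

-- ===== PORT B =====
def parse_msas_py_alt (descriptions : List String) (sequences : List String) (lengths : List Int) (counts : List Int) : List String × List (List String) :=
  let n := min lengths.length counts.length
  let bounds := (lengths.take n).scanl (fun a b => a + b) 0   -- accumulate(lengths[:n], initial=0)
  let spans := bounds.zip (bounds.tail.zip counts)            -- zip(bounds, bounds[1:], counts)
  let rows := descriptions.zip sequences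
  let first_sequences : List String :=
    match rows with
    | [] => []
    | (_, seq0) :: _ =>
      spans.foldl (fun acc sp =>
        acc ++ PySem.List.pyRepeat [PySem.Str.slice seq0 (some sp.1) (some sp.2.1)] sp.2.2) []
  let groups := rows.foldl (fun g p =>
    (PySem.List.enumerate spans 0).foldl (fun (g : PySem.Dict Int (List String)) e =>
      let seg := PySem.Str.slice p.2 (some e.2.1) (some e.2.2.1)
      if seg ≠ pvDashes seg then
        let g' := g.setdefault e.1 []
        g'.insert e.1 (g'.getD e.1 [] ++ [pvFmtEntry (pvFmtDesc p.1 e.1) seg])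
      else g) g) (PySem.Dict.empty : PySem.Dict Int (List String))
  -- counts[c] is always in range here (every stored c satisfies 0 ≤ c < min(len(lengths), len(counts)))
  let msas := groups.items.foldl (fun acc ce =>
    acc ++ PySem.List.pyRepeat [ce.2] (PySem.List.pyGetD counts ce.1 0)) []
  (first_sequences, msas)

-- ===== PRECONDITION & SPEC =====
def Spec_parse_msas_py (descriptions : List String) (sequences : List String) (lengths : List Int) (counts : List Int) (out : List String × List (List String)) : Prop := out = parse_msas_py_alt descriptions sequences lengths counts
instance (descriptions : List String) (sequences : List String) (lengths : List Int) (counts : List Int) (out : List String × List (List String)) : Decidable (Spec_parse_msas_py descriptions sequences lengths counts out) := by unfold Spec_parse_msas_py; infer_instance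

-- ===== CLAIM (what is proved, stated in full; the proofs are below) =====
def Claim_equal_parse_msas_py : Prop := ∀ (descriptions : List String) (sequences : List String) (lengths : List Int) (counts : List Int), Dom_parse_msas_py descriptions sequences lengths counts → Spec_parse_msas_py descriptions sequences lengths counts (parse_msas_py descriptions sequences lengths counts)

-- ===== LEMMAS AND PROOFS =====


theorem pv_digitChar_inj {n m : Nat} (hn : n < 10) (hm : m < 10) (h : Nat.digitChar n = Nat.digitChar m) : n = m := by
  interval_cases n <;> interval_cases m <;> first | rfl | (exfalso; revert h; decide)

theorem pv_toDigits_inj : ∀ n m : Nat, Nat.toDigits 10 n = Nat.toDigits 10 m → n = m := by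
  intro n
  induction n using Nat.strong_induction_on with
  | _ n ih =>
    intro m h
    rw [Nat.toDigits_eq_if (by norm_num)] at h
    rw [Nat.toDigits_eq_if (b := 10) (n := m) (by norm_num)] at h
    split_ifs at h with h1 h2 h2
    · simp only [List.cons.injEq] at h
      exact pv_digitChar_inj h1 h2 h.1
    · exfalso
      have hlen := congrArg List.length h
      simp only [List.length_append, List.length_cons] at hlen
      have hpos := Nat.length_toDigits_pos (b := 10) (n := m / 10)
      omega
    · exfalso
      have hlen := congrArg List.length h
      simp only [List.length_append, List.length_cons] at hlen
      have hpos := Nat.length_toDigits_pos (b := 10) (n := n / 10)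
      omega
    · have h' := List.append_inj' h (by simp)
      obtain ⟨hq, hr⟩ := h'
      simp only [List.cons.injEq] at hr
      have e1 : n / 10 = m / 10 := ih (n / 10) (by omega) _ hq
      have e2 : n % 10 = m % 10 := pv_digitChar_inj (by omega) (by omega) hr.1
      omega

theorem pv_digit_not_mem_toDigits {c : Char} (hc : c.isDigit = false) (n : Nat) : c ∉ Nat.toDigits 10 n := by
  intro hm
  have := Nat.isDigit_of_mem_toDigits (by norm_num) (by norm_num) hm
  rw [hc] at this; exact Bool.false_ne_true this

theorem pv_underscore_not_mem_toChars (n : Int) : '_' ∉ PySem.Int.toChars n := by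
  unfold PySem.Int.toChars
  split
  · intro hm
    rcases List.mem_cons.mp hm with h | h
    · exact absurd h (by decide)
    · exact pv_digit_not_mem_toDigits (by decide) _ h
  · exact pv_digit_not_mem_toDigits (by decide) _

theorem pv_toChars_inj {n m : Int} (h : PySem.Int.toChars n = PySem.Int.toChars m) : n = m := by
  unfold PySem.Int.toChars at h
  split_ifs at h with h1 h2 h2
  · simp only [List.cons.injEq] at h
    have := pv_toDigits_inj _ _ h.2
    omega
  · exfalso
    have : '-' ∈ Nat.toDigits 10 m.toNat := by rw [← h]; exact List.mem_cons_self
    exact pv_digit_not_mem_toDigits (by decide) _ this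
  · exfalso
    have : '-' ∈ Nat.toDigits 10 n.toNat := by rw [h]; exact List.mem_cons_self
    exact pv_digit_not_mem_toDigits (by decide) _ this
  · have := pv_toDigits_inj _ _ h
    omega

theorem pv_split_underscore : ∀ (a : List Char) (b : List Char) (a' b' : List Char), '_' ∉ a → '_' ∉ a' → a ++ '_' :: b = a' ++ '_' :: b' → a = a' ∧ b = b' := by
  intro a
  induction a with
  | nil =>
    intro b a' b' _ ha' h
    cases a' with
    | nil => simpa using h
    | cons x t =>
      exfalso
      simp only [List.nil_append, List.cons_append, List.cons.injEq] at h
      exact ha' (h.1 ▸ List.mem_cons_self)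
  | cons x t ih =>
    intro b a' b' ha ha' h
    cases a' with
    | nil =>
      exfalso
      simp only [List.cons_append, List.nil_append, List.cons.injEq] at h
      exact ha (h.1 ▸ List.mem_cons_self)
    | cons y t' =>
      simp only [List.cons_append, List.cons.injEq] at h
      have := ih b t' b' (fun hm => ha (List.mem_cons_of_mem _ hm)) (fun hm => ha' (List.mem_cons_of_mem _ hm)) h.2
      exact ⟨by rw [h.1, this.1], this.2⟩

theorem pv_pvKey_inj {c k c' k' : Int} (h : pvKey c k = pvKey c' k') : c = c' ∧ k = k' := by
  unfold pvKey at h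
  rw [String.ofList_inj] at h
  have := pv_split_underscore _ _ _ _ (pv_underscore_not_mem_toChars c) (pv_underscore_not_mem_toChars c') h
  exact ⟨pv_toChars_inj this.1, pv_toChars_inj this.2⟩

-- spans of the clusters: (start, end, count), as B computes them with prefix sums
def pvSpans : Int → List Int → List Int → List (Int × Int × Int)
  | _, [], _ => []
  | _, _ :: _, [] => []
  | a, l :: ls, c :: cs => (a, a + l, c) :: pvSpans (a + l) ls cs

def pvEntry (desc : String) (c : Int) (seg : String) : String := pvFmtEntry (pvFmtDesc desc c) seg

-- A's per-cluster dict update, on enumerated spans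
def pvDictStep (desc seq : String) (d : PySem.Dict String (List String)) (e : Int × Int × Int × Int) : PySem.Dict String (List String) :=
  let seg := PySem.Str.slice seq (some e.2.1) (some e.2.2.1)
  if seg ≠ pvDashes seg then
    (PySem.List.pyRange 0 e.2.2.2 1).foldl (fun d k =>
      let key := pvKey e.1 k
      let d' := if d.contains key then d else d.insert key []
      d'.insert key (d'.getD key [] ++ [pvEntry desc e.1 seg])) d
  else d

-- the first-row extension of first_sequences, per span
def pvFsStep (seq : String) (fs : List String) (sp : Int × Int × Int) : List String :=
  fs ++ PySem.List.pyRepeat [PySem.Str.slice seq (some sp.1) (some sp.2.1)] sp.2.2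

-- B's per-cluster group update, on enumerated spans
def pvGStep (desc seq : String) (g : PySem.Dict Int (List String)) (e : Int × Int × Int × Int) : PySem.Dict Int (List String) :=
  let seg := PySem.Str.slice seq (some e.2.1) (some e.2.2.1)
  if seg ≠ pvDashes seg then
    let g' := g.setdefault e.1 []
    g'.insert e.1 (g'.getD e.1 [] ++ [pvEntry desc e.1 seg])
  else g

def pvCnt (SP : List (Int × Int × Int)) (c : Int) : Int :=
  match SP[c.toNat]? with
  | some sp => sp.2.2
  | none => 0

-- A's dict, reconstructed from B's per-cluster groups
def pvRep (SP : List (Int × Int × Int)) (g : PySem.Dict Int (List String)) : List (String × List String) :=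
  g.items.flatMap (fun ce => (PySem.List.pyRange 0 (pvCnt SP ce.1) 1).map (fun k => (pvKey ce.1 k, ce.2)))

def pvGood (SP : List (Int × Int × Int)) (g : PySem.Dict Int (List String)) : Prop :=
  g.keys.Nodup ∧ ∀ ce ∈ g.items, 0 ≤ ce.1 ∧ ce.1.toNat < SP.length

-- lemma statements (proofs to come)
theorem pv_spans_eq : ∀ (ls cs : List Int) (a : Int),
    (((ls.take (min ls.length cs.length)).scanl (fun x y => x + y) a).zip
      (((ls.take (min ls.length cs.length)).scanl (fun x y => x + y) a).tail.zip cs)) = pvSpans a ls cs := by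
  intro ls
  induction ls with
  | nil => intro cs a; simp [pvSpans]
  | cons l ls ih =>
    intro cs a
    cases cs with
    | nil => simp [pvSpans]
    | cons c cs =>
      have hmin : min (l :: ls).length (c :: cs).length = min ls.length cs.length + 1 := by
        simp only [List.length_cons]; omega
      rw [hmin]
      simp only [List.take_succ_cons, List.scanl_cons, List.tail_cons]
      have hB : ∃ t, List.scanl (fun x y => x + y) (a + l) (ls.take (min ls.length cs.length)) = (a + l) :: t := by
        cases h : ls.take (min ls.length cs.length) with
        | nil => exact ⟨[], by simp⟩
        | cons x t => exact ⟨List.scanl (fun x y => x + y) (a + l + x) t, by rw [List.scanl_cons]⟩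
      obtain ⟨t, hB1⟩ := hB
      have hB2 : (List.scanl (fun x y => x + y) (a + l) (ls.take (min ls.length cs.length))).tail = t := by
        rw [hB1]; rfl
      have hIH := ih cs (a + l)
      rw [hB2, hB1] at hIH
      rw [hB1]
      simp only [List.zip_cons_cons, pvSpans]
      rw [hIH]

theorem pv_spans_counts : ∀ (ls cs : List Int) (a : Int) (j : Nat) (sp : Int × Int × Int),
    (pvSpans a ls cs)[j]? = some sp → cs[j]? = some sp.2.2 := by
  intro ls
  induction ls with
  | nil => intro cs a j sp h; simp [pvSpans] at h
  | cons l ls ih =>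
    intro cs a j sp h
    cases cs with
    | nil => simp [pvSpans] at h
    | cons c cs =>
      cases j with
      | zero => simp [pvSpans] at h; simp [← h]
      | succ j => simp only [pvSpans, List.getElem?_cons_succ] at h ⊢; exact ih cs (a + l) j sp h

theorem pv_foldl_enumerate_snd {α β : Type} (f : β → α → β) :
    ∀ (l : List α) (i : Int) (acc : β),
      (PySem.List.enumerate l i).foldl (fun b e => f b e.2) acc = l.foldl f acc := by
  intro l
  induction l with
  | nil => intro i acc; simp [PySem.List.enumerate_nil]
  | cons x t ih => intro i acc; rw [PySem.List.enumerate_cons]; simp only [List.foldl_cons]; exact ih (i + 1) (f acc x)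

theorem pv_length_pyRange (n : Int) : (PySem.List.pyRange 0 n 1).length = n.toNat := by
  simp only [PySem.List.pyRange]
  norm_num
  omega

theorem pv_nodup_pyRange (n : Int) : (PySem.List.pyRange 0 n 1).Nodup := by
  simp only [PySem.List.pyRange]
  norm_num
  by_cases hn : 0 < n
  · simp only [hn, if_true]
    exact (List.nodup_range).map (fun a b h => by omega)
  · simp [hn]

theorem pv_unit (d : PySem.Dict String (List String)) (key : String) (E : String) :
    (let d' := if d.contains key then d else d.insert key ([] : List String)
     d'.insert key (d'.getD key [] ++ [E])) = d.insert key (d.getD key [] ++ [E]) := by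
  cases hc : d.contains key with
  | true => simp only [if_true]
  | false =>
    simp only [Bool.false_eq_true, if_false]
    rw [PySem.Dict.getD_insert_self, PySem.Dict.insert_insert_self,
      PySem.Dict.getD_of_not_contains d _ hc]

theorem pv_fold_entry (E : String) :
    ∀ (ks : List String), ks.Nodup → ∀ (d : PySem.Dict String (List String)), d.keys.Nodup →
      (ks.foldl (fun d k => d.insert k (d.getD k [] ++ [E])) d).items
        = d.items.map (fun p => if p.1 ∈ ks then (p.1, p.2 ++ [E]) else p)
          ++ (ks.filter (fun k => !d.contains k)).map (fun k => (k, ([E] : List String))) := by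
  intro ks
  induction ks with
  | nil => intro _ d _; simp
  | cons k ks ih =>
    intro hnd d hd
    have hknotks : k ∉ ks := (List.nodup_cons.mp hnd).1
    simp only [List.foldl_cons]
    set d1 := d.insert k (d.getD k [] ++ [E]) with hd1
    have hd1n : d1.keys.Nodup := PySem.Dict.nodup_keys_insert d _ _ hd
    rw [ih (List.nodup_cons.mp hnd).2 d1 hd1n]
    have hfilter : (ks.filter (fun x => !d1.contains x)) = ks.filter (fun x => !d.contains x) := by
      apply List.filter_congr
      intro x hx
      have hxk : x ≠ k := fun h => hknotks (h ▸ hx)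
      rw [hd1, PySem.Dict.contains_insert]
      simp [hxk]
    rw [hfilter]
    cases hc : d.contains k with
    | true =>
      have hitems : d1.items = d.items.map (fun p => if p.1 = k then (p.1, p.2 ++ [E]) else p) := by
        rw [hd1, PySem.Dict.items_insert_of_contains d _ hc]
        apply List.map_congr_left
        intro p hp
        by_cases hpk : p.1 = k
        · simp only [hpk, beq_self_eq_true, if_true]
          have : d.getD p.1 [] = p.2 := PySem.Dict.getD_of_mem_items d (by exact (Prod.mk.eta (p := p)) ▸ hp) hd []
          rw [← hpk, this]
        · simp [hpk]
      rw [hitems, List.map_map]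
      have hfk : (k :: ks).filter (fun x => !d.contains x) = ks.filter (fun x => !d.contains x) := by
        simp [hc]
      rw [hfk]
      congr 1
      apply List.map_congr_left
      intro p hp
      by_cases hpk : p.1 = k
      · simp only [Function.comp_apply, hpk, if_true, List.mem_cons, true_or]
        simp [hknotks]
      · simp only [Function.comp_apply, hpk, if_false]
        by_cases hpks : p.1 ∈ ks <;> simp [hpks, hpk]
    | false =>
      have hknotkeys : k ∉ d.keys := fun hm =>
        by rw [(PySem.Dict.contains_iff_mem_keys d k).mpr hm] at hc; simp at hc
      have hitems : d1.items = d.items ++ [(k, [E])] := by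
        rw [hd1, PySem.Dict.getD_of_not_contains d _ hc, PySem.Dict.items_insert_of_not_contains d _ hc]
        simp
      rw [hitems, List.map_append]
      have h1 : d.items.map (fun p => if p.1 ∈ ks then (p.1, p.2 ++ [E]) else p)
          = d.items.map (fun p => if p.1 ∈ k :: ks then (p.1, p.2 ++ [E]) else p) := by
        apply List.map_congr_left
        intro p hp
        have hpk : p.1 ≠ k := fun h => hknotkeys (h ▸ PySem.Dict.mem_keys_of_mem_items d hp)
        by_cases hpks : p.1 ∈ ks <;> simp [hpks, hpk]
      have h2 : ([(k, ([E] : List String))] : List (String × List String)).map (fun p => if p.1 ∈ ks then (p.1, p.2 ++ [E]) else p) = [(k, [E])] := by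
        simp [hknotks]
      rw [h1, h2]
      have hfk : (k :: ks).filter (fun x => !d.contains x) = k :: ks.filter (fun x => !d.contains x) := by
        simp [hc]
      rw [hfk]
      simp

theorem pv_items_mk {κ ν : Type} [BEq κ] (l : List (κ × ν)) : (PySem.Dict.mk l).items = l := rfl

theorem pv_keys_mk {κ ν : Type} [BEq κ] (l : List (κ × ν)) : (PySem.Dict.mk l).keys = l.map Prod.fst := rfl

theorem pv_mem_pvRep {SP : List (Int × Int × Int)} {g : PySem.Dict Int (List String)} {p : String × List String} :
    p ∈ pvRep SP g ↔ ∃ ce ∈ g.items, ∃ kk : Int, (0 ≤ kk ∧ kk < pvCnt SP ce.1) ∧ p = (pvKey ce.1 kk, ce.2) := by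
  simp [pvRep, List.mem_flatMap, PySem.List.mem_pyRange_one, eq_comm]

theorem pv_rep_keys_nodup (SP : List (Int × Int × Int)) (g : PySem.Dict Int (List String))
    (h : g.keys.Nodup) : ((pvRep SP g).map Prod.fst).Nodup := by
  unfold pvRep
  rw [List.map_flatMap]
  rw [List.nodup_flatMap]
  constructor
  · intro ce _
    rw [List.map_map]
    have : (fun k => ((pvKey ce.1 k, ce.2) : String × List String).1) = fun k => pvKey ce.1 k := rfl
    refine List.Nodup.map_on ?_ (pv_nodup_pyRange _)
    intro x _ y _ hxy
    exact (pv_pvKey_inj hxy).2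
  · have h' : (g.items.map Prod.fst).Nodup := h
    have hpair : g.items.Pairwise (fun a b => a.1 ≠ b.1) := List.pairwise_map.mp h'
    refine hpair.imp ?_
    intro a b hab
    rw [Function.onFun]
    intro x hxa hxb
    simp only [List.map_map, List.mem_map] at hxa hxb
    obtain ⟨ka, _, hka⟩ := hxa
    obtain ⟨kb, _, hkb⟩ := hxb
    have : pvKey a.1 ka = pvKey b.1 kb := by
      simp only [Function.comp_apply] at hka hkb
      rw [hka, hkb]
    exact hab (pv_pvKey_inj this).1

theorem pv_gstep_insert (g : PySem.Dict Int (List String)) (c : Int) (E : String) :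
    (let g' := g.setdefault c []
     g'.insert c (g'.getD c [] ++ [E])) = g.insert c (g.getD c [] ++ [E]) := by
  cases hc : g.contains c with
  | true => simp only [PySem.Dict.setdefault_of_contains g _ hc]
  | false =>
    simp only [PySem.Dict.setdefault_of_not_contains g _ hc]
    rw [PySem.Dict.getD_insert_self, PySem.Dict.insert_insert_self,
      PySem.Dict.getD_of_not_contains g _ hc]

theorem pv_enum_facts {SP : List (Int × Int × Int)} {e : Int × Int × Int × Int}
    (he : e ∈ PySem.List.enumerate SP 0) :
    0 ≤ e.1 ∧ e.1.toNat < SP.length ∧ pvCnt SP e.1 = e.2.2.2 := by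
  rw [PySem.List.mem_enumerate_iff] at he
  obtain ⟨k, hk, hek⟩ := he
  have h1 : e.1 = (k : Int) := by rw [hek]; simp
  have h2 : e.2 = SP[k] := by rw [hek]
  refine ⟨by omega, by rw [h1]; simpa using hk, ?_⟩
  unfold pvCnt
  have : e.1.toNat = k := by omega
  rw [this, List.getElem?_eq_getElem hk, ← h2]

theorem pv_step (SP : List (Int × Int × Int)) (desc seq : String) (e : Int × Int × Int × Int)
    (he : e ∈ PySem.List.enumerate SP 0) (g : PySem.Dict Int (List String)) (hg : pvGood SP g) :
    pvDictStep desc seq (PySem.Dict.mk (pvRep SP g)) e = PySem.Dict.mk (pvRep SP (pvGStep desc seq g e))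
      ∧ pvGood SP (pvGStep desc seq g e) := by
  obtain ⟨he1, he2, he3⟩ := pv_enum_facts he
  unfold pvDictStep pvGStep
  by_cases hdash : PySem.Str.slice seq (some e.2.1) (some e.2.2.1) ≠ pvDashes (PySem.Str.slice seq (some e.2.1) (some e.2.2.1))
  swap
  · simp only [if_neg hdash]; exact ⟨by trivial, hg⟩
  simp only [if_pos hdash]
  set seg := PySem.Str.slice seq (some e.2.1) (some e.2.2.1) with hseg
  set E := pvEntry desc e.1 seg with hE
  -- A's inner body is a single keyed append
  have hbody : (fun (d : PySem.Dict String (List String)) k =>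
        let key := pvKey e.1 k
        let d' := if d.contains key then d else d.insert key []
        d'.insert key (d'.getD key [] ++ [pvEntry desc e.1 seg]))
      = fun d k => d.insert (pvKey e.1 k) (d.getD (pvKey e.1 k) [] ++ [E]) := by
    funext d k
    exact pv_unit d (pvKey e.1 k) E
  rw [hbody]
  rw [show (PySem.List.pyRange 0 e.2.2.2 1).foldl
        (fun d k => d.insert (pvKey e.1 k) (d.getD (pvKey e.1 k) [] ++ [E]))
        (PySem.Dict.mk (pvRep SP g))
      = ((PySem.List.pyRange 0 e.2.2.2 1).map (pvKey e.1)).foldl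
        (fun d k => d.insert k (d.getD k [] ++ [E])) (PySem.Dict.mk (pvRep SP g)) by
    rw [List.foldl_map]]
  rw [pv_gstep_insert]
  set ks := (PySem.List.pyRange 0 e.2.2.2 1).map (pvKey e.1) with hks
  have hksnd : ks.Nodup := by
    refine List.Nodup.map_on ?_ (pv_nodup_pyRange _)
    intro x _ y _ hxy
    exact (pv_pvKey_inj hxy).2
  have hrepnd : (PySem.Dict.mk (pvRep SP g)).keys.Nodup := by
    rw [pv_keys_mk]; exact pv_rep_keys_nodup SP g hg.1
  have hmemks : ∀ x : String, x ∈ ks ↔ ∃ kk : Int, 0 ≤ kk ∧ kk < e.2.2.2 ∧ x = pvKey e.1 kk := by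
    intro x
    rw [hks]
    simp only [List.mem_map, PySem.List.mem_pyRange_one]
    constructor
    · rintro ⟨kk, ⟨h1, h2⟩, h3⟩; exact ⟨kk, h1, h2, h3.symm⟩
    · rintro ⟨kk, h1, h2, h3⟩; exact ⟨kk, ⟨h1, h2⟩, h3.symm⟩
  apply And.intro
  swap
  · -- pvGood is preserved
    constructor
    · cases hc : g.contains e.1 with
      | true => rw [PySem.Dict.keys_insert_of_contains g _ hc]; exact hg.1
      | false =>
        rw [PySem.Dict.keys_insert_of_not_contains g _ hc]
        have : e.1 ∉ g.keys := fun hm => by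
          rw [(PySem.Dict.contains_iff_mem_keys g e.1).mpr hm] at hc; simp at hc
        simp only [List.nodup_append, List.nodup_singleton, true_and]
        refine ⟨hg.1, ?_⟩
        intro a ha b hb
        have hb' : b = e.1 := by simpa using hb
        intro hab
        exact this (hb' ▸ hab ▸ ha)
    · intro ce hce
      rw [PySem.Dict.mem_items_insert] at hce
      rcases hce with hce | hce
      · rw [hce]; exact ⟨he1, he2⟩
      · exact hg.2 ce hce.1
  · apply PySem.Dict.ext
    rw [pv_fold_entry E ks hksnd _ hrepnd, pv_items_mk, pv_items_mk]
    cases hc : g.contains e.1 with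
    | false =>
      have hnotkeys : e.1 ∉ g.keys := fun hm => by
        rw [(PySem.Dict.contains_iff_mem_keys g e.1).mpr hm] at hc; simp at hc
      -- all keys in ks are fresh for the represented dict
      have hfresh : ∀ x ∈ ks, (PySem.Dict.mk (pvRep SP g)).contains x = false := by
        intro x hx
        cases hcx : (PySem.Dict.mk (pvRep SP g)).contains x with
        | false => rfl
        | true =>
          exfalso
          rw [PySem.Dict.contains_iff_mem_keys, pv_keys_mk, List.mem_map] at hcx
          obtain ⟨p, hp, hpx⟩ := hcx
          rw [pv_mem_pvRep] at hp
          obtain ⟨ce, hcemem, kk, _, hpk⟩ := hp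
          obtain ⟨kk', _, _, hx'⟩ := (hmemks x).mp hx
          have : pvKey ce.1 kk = pvKey e.1 kk' := by
            rw [hpk] at hpx; simp at hpx; rw [← hx', ← hpx]
          have hcee : ce.1 = e.1 := (pv_pvKey_inj this).1
          exact hnotkeys (hcee ▸ PySem.Dict.mem_keys_of_mem_items g hcemem)
      have hfilter : ks.filter (fun k => !(PySem.Dict.mk (pvRep SP g)).contains k) = ks := by
        apply List.filter_eq_self.mpr
        intro x hx; rw [hfresh x hx]; rfl
      have hmapid : (pvRep SP g).map (fun p => if p.1 ∈ ks then (p.1, p.2 ++ [E]) else p) = pvRep SP g := by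
        have : ∀ p ∈ pvRep SP g, (if p.1 ∈ ks then (p.1, p.2 ++ [E]) else p) = p := by
          intro p hp
          have hnotin : p.1 ∉ ks := by
            intro hpk
            have hff := hfresh p.1 hpk
            have htt : (PySem.Dict.mk (pvRep SP g)).contains p.1 = true :=
              (PySem.Dict.contains_iff_mem_keys _ _).mpr (by rw [pv_keys_mk]; exact List.mem_map.mpr ⟨p, hp, rfl⟩)
            rw [htt] at hff
            exact Bool.true_eq_false.mp hff
          rw [if_neg hnotin]
        calc (pvRep SP g).map _ = (pvRep SP g).map id := List.map_congr_left this
          _ = pvRep SP g := List.map_id _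
      rw [hfilter, hmapid]
      -- right-hand side: a fresh cluster appends its whole group
      rw [PySem.Dict.getD_of_not_contains g _ hc]
      rw [show pvRep SP (g.insert e.1 ([] ++ [E])) = pvRep SP g ++ (PySem.List.pyRange 0 e.2.2.2 1).map (fun k => (pvKey e.1 k, [E])) by
        unfold pvRep
        rw [PySem.Dict.items_insert_of_not_contains g _ hc, List.flatMap_append]
        simp [he3]]
      rw [hks, List.map_map]
      rfl
    | true =>
      have hsome : ∃ es, g.get? e.1 = some es := by
        have := PySem.Dict.contains_eq_isSome_get? (d := g) (k := e.1)
        rw [hc] at this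
        cases hq : g.get? e.1 with
        | none => rw [hq] at this; simp at this
        | some es => exact ⟨es, rfl⟩
      obtain ⟨es, hes⟩ := hsome
      have hmem : (e.1, es) ∈ g.items := PySem.Dict.mem_items_of_get?_eq_some g hes
      have hgetD : g.getD e.1 [] = es := PySem.Dict.getD_of_get?_eq_some g [] hes
      have hcontained : ∀ x ∈ ks, (PySem.Dict.mk (pvRep SP g)).contains x = true := by
        intro x hx
        obtain ⟨kk, hk1, hk2, hx'⟩ := (hmemks x).mp hx
        rw [PySem.Dict.contains_iff_mem_keys, pv_keys_mk, List.mem_map]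
        refine ⟨(pvKey e.1 kk, es), ?_, by rw [hx']⟩
        rw [pv_mem_pvRep]
        exact ⟨(e.1, es), hmem, kk, ⟨hk1, by rw [he3]; exact hk2⟩, rfl⟩
      have hfilter : ks.filter (fun k => !(PySem.Dict.mk (pvRep SP g)).contains k) = [] := by
        apply List.filter_eq_nil_iff.mpr
        intro x hx; rw [hcontained x hx]; simp
      rw [hfilter, hgetD]
      simp only [List.map_nil, List.append_nil]
      unfold pvRep
      rw [PySem.Dict.items_insert_of_contains g _ hc]
      rw [List.map_flatMap, List.flatMap_map]
      apply List.flatMap_congr ?_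
      intro ce hce
      have hceD : g.getD ce.1 [] = ce.2 := PySem.Dict.getD_of_mem_items g (by exact (Prod.mk.eta (p := ce)) ▸ hce) hg.1 []
      by_cases hce1 : ce.1 = e.1
      · have hces : ce.2 = es := by rw [← hceD, hce1, hgetD]
        have hcee : ce = (e.1, es) := Prod.ext_iff.mpr ⟨hce1, hces⟩
        rw [hcee]
        simp only [beq_self_eq_true, if_true, List.map_map]
        apply List.map_congr_left
        intro k hk
        rw [PySem.List.mem_pyRange_one] at hk
        have hkks : pvKey e.1 k ∈ ks := (hmemks _).mpr ⟨k, hk.1, by rw [← he3]; exact hk.2, rfl⟩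
        simp only [Function.comp_apply, hkks, if_true]
      · have hbeq : (ce.1 == e.1) = false := by simp [hce1]
        simp only [hbeq, Bool.false_eq_true, if_false]
        rw [List.map_map]
        have : ∀ k ∈ PySem.List.pyRange 0 (pvCnt SP ce.1) 1, pvKey ce.1 k ∉ ks := by
          intro k _ hkks
          obtain ⟨kk, _, _, hx'⟩ := (hmemks _).mp hkks
          exact hce1 (pv_pvKey_inj hx').1
        apply List.map_congr_left
        intro k hk
        simp only [Function.comp_apply, this k hk, if_false]

theorem pv_row (SP : List (Int × Int × Int)) (desc seq : String) :
    ∀ (l : List (Int × Int × Int × Int)), (∀ e ∈ l, e ∈ PySem.List.enumerate SP 0) →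
      ∀ g : PySem.Dict Int (List String), pvGood SP g →
        l.foldl (pvDictStep desc seq) (PySem.Dict.mk (pvRep SP g))
            = PySem.Dict.mk (pvRep SP (l.foldl (pvGStep desc seq) g))
          ∧ pvGood SP (l.foldl (pvGStep desc seq) g) := by
  intro l
  induction l with
  | nil => intro _ g hg; exact ⟨rfl, hg⟩
  | cons e t ih =>
    intro hmem g hg
    simp only [List.foldl_cons]
    obtain ⟨h1, h2⟩ := pv_step SP desc seq e (hmem e List.mem_cons_self) g hg
    rw [h1]
    exact ih (fun x hx => hmem x (List.mem_cons_of_mem _ hx)) _ h2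

theorem pv_rows (SP : List (Int × Int × Int)) :
    ∀ (rows : List (String × String)) (g : PySem.Dict Int (List String)), pvGood SP g →
      rows.foldl (fun d p => (PySem.List.enumerate SP 0).foldl (pvDictStep p.1 p.2) d) (PySem.Dict.mk (pvRep SP g))
          = PySem.Dict.mk (pvRep SP (rows.foldl (fun g p => (PySem.List.enumerate SP 0).foldl (pvGStep p.1 p.2) g) g))
        ∧ pvGood SP (rows.foldl (fun g p => (PySem.List.enumerate SP 0).foldl (pvGStep p.1 p.2) g) g) := by
  intro rows
  induction rows with
  | nil => intro g hg; exact ⟨rfl, hg⟩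
  | cons p t ih =>
    intro g hg
    simp only [List.foldl_cons]
    obtain ⟨h1, h2⟩ := pv_row SP p.1 p.2 (PySem.List.enumerate SP 0) (fun _ hx => hx) g hg
    rw [h1]
    exact ih _ h2

theorem pv_rowA_norm (desc seq : String) (first : Bool) :
    ∀ (ls cs : List Int) (i a : Int) (d : PySem.Dict String (List String)) (fs : List String),
      ((PySem.List.enumerate (ls.zip cs) i).foldl
        (fun (s : Int × PySem.Dict String (List String) × List String) e =>
          let segStart := s.1
          let segEnd := segStart + e.2.1
          let seg := PySem.Str.slice seq (some segStart) (some segEnd)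
          let fs := if first then s.2.2 ++ PySem.List.pyRepeat [seg] e.2.2 else s.2.2
          let sdesc := pvFmtDesc desc e.1
          let d :=
            if seg ≠ pvDashes seg then
              (PySem.List.pyRange 0 e.2.2 1).foldl (fun d k =>
                let key := pvKey e.1 k
                let d' := if d.contains key then d else d.insert key []
                d'.insert key (d'.getD key [] ++ [pvFmtEntry sdesc seg])) s.2.1
            else s.2.1
          (s.1 + e.2.1, d, fs)) (a, d, fs)).2
      = ((PySem.List.enumerate (pvSpans a ls cs) i).foldl (pvDictStep desc seq) d,
         (PySem.List.enumerate (pvSpans a ls cs) i).foldl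
           (fun fs e => if first then pvFsStep seq fs e.2 else fs) fs) := by
  intro ls
  induction ls with
  | nil =>
    intro cs i a d fs
    simp [pvSpans, PySem.List.enumerate_nil]
  | cons l ls ih =>
    intro cs i a d fs
    cases cs with
    | nil => simp [pvSpans, PySem.List.enumerate_nil]
    | cons c cs =>
      simp only [List.zip_cons_cons, pvSpans, PySem.List.enumerate_cons, List.foldl_cons]
      rw [ih cs (i + 1) (a + l)]
      rfl

def pvABody (lengths counts : List Int) :
    (PySem.Dict String (List String) × List String × Bool) → (String × String) →
      (PySem.Dict String (List String) × List String × Bool) :=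
  fun st p =>
    let inner := (PySem.List.enumerate (lengths.zip counts) 0).foldl
      (fun (s : Int × PySem.Dict String (List String) × List String) e =>
        let segStart := s.1
        let segEnd := segStart + e.2.1
        let seg := PySem.Str.slice p.2 (some segStart) (some segEnd)
        let fs := if st.2.2 then s.2.2 ++ PySem.List.pyRepeat [seg] e.2.2 else s.2.2
        let sdesc := pvFmtDesc p.1 e.1
        let d :=
          if seg ≠ pvDashes seg then
            (PySem.List.pyRange 0 e.2.2 1).foldl (fun d k =>
              let key := pvKey e.1 k
              let d' := if d.contains key then d else d.insert key []
              d'.insert key (d'.getD key [] ++ [pvFmtEntry sdesc seg])) s.2.1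
          else s.2.1
        (s.1 + e.2.1, d, fs))
      (0, st.1, st.2.1)
    (inner.2.1, inner.2.2, false)

theorem pv_A_eq (descriptions sequences : List String) (lengths counts : List Int) :
    parse_msas_py descriptions sequences lengths counts =
      (let st := (descriptions.zip sequences).foldl (pvABody lengths counts) (PySem.Dict.empty, [], true)
       (st.2.1, st.1.values)) := rfl

theorem pv_ABody_eval (lengths counts : List Int) (p : String × String)
    (d : PySem.Dict String (List String)) (fs : List String) (b : Bool) :
    pvABody lengths counts (d, fs, b) p =
      ((PySem.List.enumerate (pvSpans 0 lengths counts) 0).foldl (pvDictStep p.1 p.2) d,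
       (PySem.List.enumerate (pvSpans 0 lengths counts) 0).foldl
         (fun fs e => if b then pvFsStep p.2 fs e.2 else fs) fs,
       false) := by
  have h := pv_rowA_norm p.1 p.2 b lengths counts 0 0 d fs
  unfold pvABody
  simp only at h ⊢
  rw [h]

theorem pv_fs_false (seq : String) (l : List (Int × Int × Int × Int)) (fs : List String) :
    l.foldl (fun fs e => if (false : Bool) then pvFsStep seq fs e.2 else fs) fs = fs := by
  simp only [Bool.false_eq_true, if_false]
  exact PySem.List.foldl_ignore l fs

theorem pv_outerA (lengths counts : List Int) :
    ∀ (rest : List (String × String)) (d : PySem.Dict String (List String)) (fs : List String),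
      rest.foldl (pvABody lengths counts) (d, fs, false)
        = (rest.foldl (fun d q => (PySem.List.enumerate (pvSpans 0 lengths counts) 0).foldl (pvDictStep q.1 q.2) d) d,
           fs, false) := by
  intro rest
  induction rest with
  | nil => intro d fs; rfl
  | cons q t ih =>
    intro d fs
    simp only [List.foldl_cons]
    rw [pv_ABody_eval, pv_fs_false]
    exact ih _ fs

theorem pv_getD_counts (lengths counts : List Int) (c : Int) (h0 : 0 ≤ c)
    (hlt : c.toNat < (pvSpans 0 lengths counts).length) :
    PySem.List.pyGetD counts c 0 = pvCnt (pvSpans 0 lengths counts) c := by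
  rw [PySem.List.pyGetD_of_nonneg _ _ h0]
  obtain ⟨sp, hsp⟩ : ∃ sp, (pvSpans 0 lengths counts)[c.toNat]? = some sp :=
    ⟨_, List.getElem?_eq_getElem hlt⟩
  have hcs := pv_spans_counts lengths counts 0 c.toNat sp hsp
  unfold pvCnt
  rw [hsp, List.getD_eq_getElem?_getD, hcs]
  rfl

theorem pv_msas (lengths counts : List Int) (G : PySem.Dict Int (List String))
    (hG : pvGood (pvSpans 0 lengths counts) G) :
    (pvRep (pvSpans 0 lengths counts) G).map Prod.snd
      = G.items.foldl (fun acc ce => acc ++ PySem.List.pyRepeat [ce.2] (PySem.List.pyGetD counts ce.1 0)) [] := by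
  rw [PySem.List.foldl_append_eq_flatMap]
  simp only [List.nil_append]
  unfold pvRep
  rw [List.map_flatMap]
  apply List.flatMap_congr
  intro ce hce
  obtain ⟨h0, hlt⟩ := hG.2 ce hce
  rw [List.map_map]
  rw [pv_getD_counts lengths counts ce.1 h0 hlt, PySem.List.pyRepeat_singleton]
  have hconst : (Prod.snd ∘ fun k : Int => (pvKey ce.1 k, ce.2)) = fun _ => ce.2 := rfl
  rw [hconst, List.map_const', pv_length_pyRange]

theorem pv_good_empty (SP : List (Int × Int × Int)) : pvGood SP PySem.Dict.empty := by
  constructor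
  · exact PySem.Dict.nodup_keys_empty
  · intro ce hce
    cases hce

theorem pv_main (descriptions sequences : List String) (lengths counts : List Int) :
    parse_msas_py descriptions sequences lengths counts = parse_msas_py_alt descriptions sequences lengths counts := by
  rw [pv_A_eq]
  simp only [parse_msas_py_alt]
  rw [pv_spans_eq]
  cases hrows : descriptions.zip sequences with
  | nil => simp only [List.foldl_nil]; rfl
  | cons p rest =>
    obtain ⟨p1, p2⟩ := p
    simp only [List.foldl_cons]
    rw [pv_ABody_eval, pv_outerA]
    obtain ⟨hD, hG⟩ := pv_rows (pvSpans 0 lengths counts) ((p1, p2) :: rest) PySem.Dict.empty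
      (pv_good_empty _)
    simp only [List.foldl_cons] at hD
    rw [show (PySem.Dict.mk (pvRep (pvSpans 0 lengths counts) PySem.Dict.empty)) = PySem.Dict.empty from rfl] at hD
    rw [Prod.ext_iff]
    constructor
    · -- first_sequences agree
      simp only [if_true]
      rw [pv_foldl_enumerate_snd (pvFsStep p2) (pvSpans 0 lengths counts) 0 []]
      rfl
    · -- msas agree
      show (rest.foldl
          (fun d q => (PySem.List.enumerate (pvSpans 0 lengths counts) 0).foldl (pvDictStep q.1 q.2) d)
          ((PySem.List.enumerate (pvSpans 0 lengths counts) 0).foldl (pvDictStep p1 p2) PySem.Dict.empty)).values = _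
      rw [hD]
      exact pv_msas lengths counts _ hG

-- ===== VERDICT (by name: the statement is the Claim_ definition above) =====
theorem parse_msas_py_spec : Claim_equal_parse_msas_py := by
  intro descriptions sequences lengths counts _
  unfold Spec_parse_msas_py
  exact pv_main descriptions sequences lengths counts
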